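-- pv_equiv track=rewrite | github.com/nAT132HAnR/YAy2aJXY | mental_health_assessment_0929_1938_ydz.py | evaluate_mood
-- ===== SOURCE A (Python) =====
-- def evaluate_mood(responses):
--     # Basic mood evaluation logic
--     positive_answers = sum(1 for response in responses if 'positive' in response.lower())
--     negative_answers = sum(1 for response in responses if 'negative' in response.lower())
--
--     if positive_answers > negative_answers:
--         return 'Positive'
--     elif negative_answers > positive_answers:
--         return 'Negative'
--     else:
--         return 'Neutral'
-- ===== SOURCE B (Python) =====
-- def evaluate_mood(responses):
--     # One pass keeping a single signed net score instead of two counts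
--     net = 0
--     for response in responses:
--         r = response.lower()
--         if 'positive' in r:
--             net += 1
--         if 'negative' in r:
--             net -= 1
--     return 'Positive' if net > 0 else 'Negative' if net < 0 else 'Neutral'
-- ===== Notes on version B (the rewrite author's own statement) =====
-- stated objective: simpler
-- what changed: Replaces the two separate counting passes over the list with one pass that keeps a single signed net score compared to zero.
import Mathlib
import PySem

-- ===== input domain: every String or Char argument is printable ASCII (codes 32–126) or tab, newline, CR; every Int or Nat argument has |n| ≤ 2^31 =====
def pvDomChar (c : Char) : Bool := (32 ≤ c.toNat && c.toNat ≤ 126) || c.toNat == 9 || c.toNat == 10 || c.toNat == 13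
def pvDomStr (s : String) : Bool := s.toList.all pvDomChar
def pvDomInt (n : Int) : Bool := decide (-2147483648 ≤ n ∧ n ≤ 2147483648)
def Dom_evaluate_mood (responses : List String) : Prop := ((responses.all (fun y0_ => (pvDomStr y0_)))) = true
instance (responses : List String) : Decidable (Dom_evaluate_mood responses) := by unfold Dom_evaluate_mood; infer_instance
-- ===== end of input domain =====

-- B folds one signed net score in a single pass instead of A's two counting passes; same result, stated objective: simpler.
-- ===== PORT A =====
def evaluate_mood (responses : List String) : String :=
  let positive_answers : Int := responses.foldl
    (fun acc response => if PySem.Str.isIn "positive" (PySem.Str.lower response) then acc + 1 else acc) 0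
  let negative_answers : Int := responses.foldl
    (fun acc response => if PySem.Str.isIn "negative" (PySem.Str.lower response) then acc + 1 else acc) 0
  if positive_answers > negative_answers then "Positive"
  else if negative_answers > positive_answers then "Negative"
  else "Neutral"

-- ===== PORT B =====
def evaluate_mood_alt (responses : List String) : String :=
  let net : Int := responses.foldl
    (fun net response =>
      let r := PySem.Str.lower response
      let net := if PySem.Str.isIn "positive" r then net + 1 else net
      if PySem.Str.isIn "negative" r then net - 1 else net) 0
  if net > 0 then "Positive" else if net < 0 then "Negative" else "Neutral"

-- ===== PRECONDITION & SPEC =====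
def Spec_evaluate_mood (responses : List String) (out : String) : Prop := out = evaluate_mood_alt responses
instance (responses : List String) (out : String) : Decidable (Spec_evaluate_mood responses out) := by unfold Spec_evaluate_mood; infer_instance

-- ===== CLAIM (what is proved, stated in full; the proofs are below) =====
def Claim_equal_evaluate_mood : Prop := ∀ (responses : List String), Dom_evaluate_mood responses → Spec_evaluate_mood responses (evaluate_mood responses)

-- ===== LEMMAS AND PROOFS =====

-- ===== VERDICT (by name: the statement is the Claim_ definition above) =====
lemma net_eq_counts (responses : List String) (k : Int) :
    responses.foldl
        (fun net response =>
          let r := PySem.Str.lower response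
          let net := if PySem.Str.isIn "positive" r then net + 1 else net
          if PySem.Str.isIn "negative" r then net - 1 else net) k
      = k
        + responses.foldl
            (fun acc response => if PySem.Str.isIn "positive" (PySem.Str.lower response) then acc + 1 else acc) 0
        - responses.foldl
            (fun acc response => if PySem.Str.isIn "negative" (PySem.Str.lower response) then acc + 1 else acc) 0 := by
  have e1 : (fun (acc : Int) (response : String) => if PySem.Str.isIn "positive" (PySem.Str.lower response) then acc + 1 else acc)
      = fun acc response => acc + (if PySem.Str.isIn "positive" (PySem.Str.lower response) then (1:Int) else 0) := by
    funext acc r; split <;> simp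
  have e2 : (fun (acc : Int) (response : String) => if PySem.Str.isIn "negative" (PySem.Str.lower response) then acc + 1 else acc)
      = fun acc response => acc + (if PySem.Str.isIn "negative" (PySem.Str.lower response) then (1:Int) else 0) := by
    funext acc r; split <;> simp
  have e3 : (fun (net : Int) (response : String) =>
        let r := PySem.Str.lower response
        let net := if PySem.Str.isIn "positive" r then net + 1 else net
        if PySem.Str.isIn "negative" r then net - 1 else net)
      = fun net response => net + ((if PySem.Str.isIn "positive" (PySem.Str.lower response) then (1:Int) else 0)
          - (if PySem.Str.isIn "negative" (PySem.Str.lower response) then (1:Int) else 0)) := by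
    funext net r; simp only []; split <;> split <;> ring
  have fa : ∀ (f : String → Int) (l : List String) (a : Int),
      l.foldl (fun acc x => acc + f x) a = a + (l.map f).sum := by
    intro f l
    induction l with
    | nil => intro a; simp
    | cons h t ih => intro a; simp [ih]; ring
  rw [e1, e2, e3, fa, fa, fa]
  induction responses with
  | nil => simp
  | cons h t ih => simp only [List.map_cons, List.sum_cons] at *; omega

theorem evaluate_mood_spec : Claim_equal_evaluate_mood := by
  intro responses _
  unfold Spec_evaluate_mood evaluate_mood evaluate_mood_alt
  rw [net_eq_counts]
  set p := responses.foldl (fun acc response => if PySem.Str.isIn "positive" (PySem.Str.lower response) then acc + 1 else acc) (0:Int)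
  set n := responses.foldl (fun acc response => if PySem.Str.isIn "negative" (PySem.Str.lower response) then acc + 1 else acc) (0:Int)
  by_cases h1 : p > n <;> by_cases h2 : n > p <;> simp_all
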